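-- pv_equiv track=rewrite | github.com/GoldanDavidTeodor/GoldanDavid_Mancala | Mancala/rules.py | _sow_list
-- ===== SOURCE A (Python) =====
-- from typing import List, Tuple
--
-- def _sow_list(pits: List[int], start_idx: int) -> Tuple[int, List[int]]:
--     """
--     Simulate sowing seeds on a raw list of integers.
--
--     Args:
--         pits (List[int]): List of seed/stone counts.
--         start_idx (int): Index to start sowing from.
--
--     Returns:
--         Tuple[int, List[int]]: (Index where last stone landed, updated list).
--     """
--     pits = pits.copy()
--     seeds = pits[start_idx]
--     pits[start_idx] = 0
--     idx = start_idx
--     while seeds > 0: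
--         idx = (idx + 1) % len(pits)
--         pits[idx] += 1
--         seeds -= 1
--     return idx, pits
-- ===== SOURCE B (Python) =====
-- from typing import List, Tuple
--
-- def _sow_list(pits: List[int], start_idx: int) -> Tuple[int, List[int]]:
--     """Closed-form sowing: every pit gets seeds//n, the next seeds%n pits one more."""
--     n = len(pits)
--     seeds = pits[start_idx]
--     s = start_idx % n
--     q, r = divmod(seeds, n) if seeds > 0 else (0, 0)
--     out = [(0 if i == s else v) + q + (1 if (i - s - 1) % n < r else 0)
--            for i, v in enumerate(pits)]
--     idx = (s + seeds) % n if seeds > 0 else start_idx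
--     return idx, out
-- ===== Notes on version B (the rewrite author's own statement) =====
-- stated objective: alternative
-- what changed: Replaces the stone-by-stone sowing while-loop with a closed-form arithmetic distribution: every pit gets seeds//n, the next seeds%n pits one extra, final index = (start+seeds)%n.
import Mathlib
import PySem

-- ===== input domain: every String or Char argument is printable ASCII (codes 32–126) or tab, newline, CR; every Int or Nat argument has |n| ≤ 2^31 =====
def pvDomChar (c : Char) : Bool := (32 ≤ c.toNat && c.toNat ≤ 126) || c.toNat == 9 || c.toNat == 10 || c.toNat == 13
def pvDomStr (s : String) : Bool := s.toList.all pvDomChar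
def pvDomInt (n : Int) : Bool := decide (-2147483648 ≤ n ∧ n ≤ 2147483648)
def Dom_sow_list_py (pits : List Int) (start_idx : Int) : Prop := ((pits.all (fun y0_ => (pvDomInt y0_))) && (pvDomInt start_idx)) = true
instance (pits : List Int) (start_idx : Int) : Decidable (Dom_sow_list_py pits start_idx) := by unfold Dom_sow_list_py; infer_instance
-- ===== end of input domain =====

-- B replaces A's one-stone-at-a-time sowing loop by a closed-form arithmetic distribution
-- (seeds//n to every pit, one extra to the next seeds%n pits, final index (start+seeds)%n).

-- ===== PORT A =====
-- the `while seeds > 0` loop, one iteration per stone; fuel = seeds.toNat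
def sowLoopA (fuel : Nat) (pits : List Int) (idx : Int) : Int × List Int :=
  match fuel with
  | 0 => (idx, pits)
  | m + 1 =>
    let idx' := PySem.Int.mod (idx + 1) (pits.length : Int)
    let pits' := PySem.List.pySetD pits idx' (PySem.List.pyGetD pits idx' 0 + 1)
    sowLoopA m pits' idx'

def sow_list_py (pits : List Int) (start_idx : Int) : Int × List Int :=
  match PySem.List.pyGet? pits start_idx with
  | none => (0, [])   -- IndexError; excluded by Pre_
  | some seeds =>
    let pits1 := PySem.List.pySetD pits start_idx 0
    sowLoopA seeds.toNat pits1 start_idx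

-- ===== PORT B =====
def sow_list_py_alt (pits : List Int) (start_idx : Int) : Int × List Int :=
  let n : Int := pits.length
  match PySem.List.pyGet? pits start_idx with
  | none => (0, [])   -- IndexError; excluded by Pre_
  | some seeds =>
    let s := PySem.Int.mod start_idx n
    let q := if seeds > 0 then PySem.Int.floordiv seeds n else 0
    let r := if seeds > 0 then PySem.Int.mod seeds n else 0
    let out := (PySem.List.enumerate pits 0).map (fun p =>
      (if p.1 = s then 0 else p.2) + q +
      (if PySem.Int.mod (p.1 - s - 1) n < r then 1 else 0))
    let idx := if seeds > 0 then PySem.Int.mod (s + seeds) n else start_idx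
    (idx, out)

-- ===== PRECONDITION & SPEC =====
-- A raises IndexError iff start_idx is out of range (in particular on an empty list).
def Pre_sow_list_py (pits : List Int) (start_idx : Int) : Prop :=
  PySem.Raise.InRange pits.length start_idx
instance (pits : List Int) (start_idx : Int) : Decidable (Pre_sow_list_py pits start_idx) := by
  unfold Pre_sow_list_py; infer_instance

def pvWitness_sow_list_py : List Int × Int := ([4, 0, 2], -2)

def Spec_sow_list_py (pits : List Int) (start_idx : Int) (out : Int × List Int) : Prop := out = sow_list_py_alt pits start_idx
instance (pits : List Int) (start_idx : Int) (out : Int × List Int) : Decidable (Spec_sow_list_py pits start_idx out) := by unfold Spec_sow_list_py; infer_instance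

-- ===== CLAIM (what is proved, stated in full; the proofs are below) =====
def Claim_equal_sow_list_py : Prop := ∀ (pits : List Int) (start_idx : Int), Dom_sow_list_py pits start_idx → Pre_sow_list_py pits start_idx → Spec_sow_list_py pits start_idx (sow_list_py pits start_idx)

-- ===== LEMMAS AND PROOFS =====

theorem emod_sub_emod_right (a b n : Int) : (a - b % n) % n = (a - b) % n := by
  conv_lhs => rw [Int.sub_emod, Int.emod_emod_of_dvd b dvd_rfl, ← Int.sub_emod]

-- Python index normalization under InRange: both pyGet? / pySetD act at (i % len)
theorem pyIdx?_emod (len : Nat) (i : Int) (h : PySem.Raise.InRange len i) :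
    PySem.List.pyIdx? len i = some ((i % (len : Int)).toNat) := by
  obtain ⟨h1, h2⟩ := h
  unfold PySem.List.pyIdx?
  by_cases h0 : 0 ≤ i
  · rw [if_pos h0, if_pos h2, Int.emod_eq_of_lt h0 h2]
  · push_neg at h0
    rw [if_neg (not_le.mpr h0), if_pos h1]
    have hlen : 0 < (len : Int) := by omega
    have he : i % (len : Int) = i + len := by
      have e1 : i % (len : Int) = (i + len * 1) % len := by rw [Int.add_mul_emod_self_left]
      rw [e1, mul_one, Int.emod_eq_of_lt (by omega) (by omega)]
    rw [he]; congr 1; omega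

-- number of stones pit i receives when m stones are sown starting after index j (closed form)
def cnt (n j i : Int) (m : Nat) : Int :=
  (m : Int) / n + (if (i - j - 1) % n < (m : Int) % n then 1 else 0)

theorem cnt_step (n i j : Int) (m : Nat) (hn : 0 < n) (hi0 : 0 ≤ i) (hin : i < n) :
    (if i = (j + 1) % n then (1 : Int) else 0) + cnt n ((j + 1) % n) i m
      = cnt n j i (m + 1) := by
  have hne : n ≠ 0 := by omega
  unfold cnt
  push_cast
  set M := (m : Int) with hMdef
  have hM : 0 ≤ M := by positivity
  have hr0 : 0 ≤ M % n := Int.emod_nonneg M hne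
  have hrn : M % n < n := Int.emod_lt_of_pos M hn
  have hqr : n * (M / n) + M % n = M := Int.ediv_add_emod M n
  set q := M / n
  set r := M % n
  have h1 : (M + 1) % n = (r + 1) % n := by
    conv_lhs => rw [show M + 1 = r + 1 + n * q by omega]
    rw [Int.add_mul_emod_self_left]
  have h2 : (M + 1) / n = (r + 1) / n + q := by
    conv_lhs => rw [show M + 1 = r + 1 + n * q by omega]
    rw [Int.add_mul_ediv_left _ _ hne]
  have hD0 : 0 ≤ (i - j - 2) % n := Int.emod_nonneg _ hne
  have hDn : (i - j - 2) % n < n := Int.emod_lt_of_pos _ hn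
  have hDqr : n * ((i - j - 2) / n) + (i - j - 2) % n = i - j - 2 := Int.ediv_add_emod _ n
  set D := (i - j - 2) % n
  set t := (i - j - 2) / n
  have hD' : (i - j - 1) % n = (D + 1) % n := by
    conv_lhs => rw [show i - j - 1 = D + 1 + n * t by omega]
    rw [Int.add_mul_emod_self_left]
  have e1 : (i - (j + 1) % n - 1) % n = D := by
    have e : i - (j + 1) % n - 1 = (i - 1) - (j + 1) % n := by ring
    rw [e, emod_sub_emod_right]
    congr 1; ring
  have hiJ : (i = (j + 1) % n) ↔ ((i - j - 1) % n = 0) := by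
    have hii : i % n = i := Int.emod_eq_of_lt hi0 hin
    constructor
    · intro h
      rw [show i - j - 1 = i - (j + 1) by ring, h, Int.sub_emod,
        Int.emod_emod_of_dvd _ dvd_rfl, sub_self, Int.zero_emod]
    · intro h
      have : i % n = (j + 1) % n := by
        rw [Int.emod_eq_emod_iff_emod_sub_eq_zero,
          show i - (j + 1) = i - j - 1 by ring, h]
      rw [← hii, this]
  rw [e1, hD', h1, h2]
  simp only [hiJ, hD']
  by_cases hD1 : D + 1 = n
  · rw [hD1, Int.emod_self]
    by_cases hr1 : r + 1 = n
    · rw [hr1, Int.emod_self, Int.ediv_self hne]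
      split_ifs <;> omega
    · rw [Int.emod_eq_of_lt (by omega) (by omega),
        Int.ediv_eq_zero_of_lt (by omega) (by omega)]
      split_ifs <;> omega
  · rw [Int.emod_eq_of_lt (by omega) (by omega)]
    by_cases hr1 : r + 1 = n
    · rw [hr1, Int.emod_self, Int.ediv_self hne]
      split_ifs <;> omega
    · rw [Int.emod_eq_of_lt (a := r + 1) (by omega) (by omega),
        Int.ediv_eq_zero_of_lt (by omega) (by omega)]
      split_ifs <;> omega

theorem sowLoopA_spec (m : Nat) (l : List Int) (j : Int) (hn : 0 < l.length) :
    (sowLoopA m l j).1 = (if m = 0 then j else (j + m) % (l.length : Int)) ∧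
    (sowLoopA m l j).2.length = l.length ∧
    ∀ (i : Nat), i < l.length →
      (sowLoopA m l j).2[i]? = some (l[i]! + cnt (l.length : Int) j i m) := by
  induction m generalizing l j with
  | zero =>
    refine ⟨rfl, rfl, fun i h => ?_⟩
    have hnz : ((l.length : Int)) ≠ 0 := by omega
    have hmod : 0 ≤ ((i : Int) - j - 1) % (l.length : Int) := Int.emod_nonneg _ hnz
    simp [sowLoopA, cnt, List.getElem?_eq_getElem h, List.getElem!_eq_getElem?_getD,
      not_lt.mpr hmod]
  | succ m ih =>
    have hn' : (0 : Int) < (l.length : Int) := by omega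
    have hmod : PySem.Int.mod (j + 1) (l.length : Int) = (j + 1) % (l.length : Int) :=
      PySem.Int.mod_eq_emod_of_pos hn'
    set J := (j + 1) % (l.length : Int) with hJdef
    have hJ0 : 0 ≤ J := Int.emod_nonneg _ (by omega)
    have hJn : J < (l.length : Int) := Int.emod_lt_of_pos _ hn'
    have hJt : (J.toNat : Int) = J := Int.toNat_of_nonneg hJ0
    have hk : J.toNat < l.length := by omega
    have hset : PySem.List.pySetD l J (PySem.List.pyGetD l J 0 + 1)
        = l.set J.toNat (l[J.toNat]! + 1) := by
      rw [PySem.List.pySetD_of_nonneg l _ hJ0]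
      congr 1
      rw [PySem.List.pyGetD_of_nonneg l 0 hJ0]
      simp [List.getElem!_eq_getElem?_getD, List.getElem?_eq_getElem hk, List.getD_eq_getElem?_getD]
    set l' := l.set J.toNat (l[J.toNat]! + 1) with hl'
    have hlen' : l'.length = l.length := by simp [hl']
    have hstep : sowLoopA (m + 1) l j = sowLoopA m l' J := by
      simp only [sowLoopA, hmod, hset]
    obtain ⟨ih1, ih2, ih3⟩ := ih l' J (by omega)
    refine ⟨?_, ?_, ?_⟩
    · rw [hstep, ih1]
      by_cases hm : m = 0
      · subst hm; simp [hJdef]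
      · rw [if_neg hm, if_neg (by omega), hlen']
        rw [hJdef, Int.emod_add_emod]
        congr 1; push_cast; ring
    · rw [hstep, ih2, hlen']
    · intro i h
      rw [hstep, ih3 i (by omega)]
      rw [hlen'] at *
      congr 1
      have hl'i : l'[i]! = if (i : Int) = J then l[i]! + 1 else l[i]! := by
        simp only [hl', List.getElem!_eq_getElem?_getD, List.getElem?_set]
        by_cases hc : (i : Int) = J
        · have : J.toNat = i := by omega
          simp [this, hc, h]
        · have : J.toNat ≠ i := by omega
          simp [this, hc]
      rw [hl'i, ← cnt_step (l.length : Int) i j m hn' (by omega) (by omega), ← hJdef]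
      by_cases hc : (i : Int) = J <;> simp [hc] <;> ring
    
-- ===== VERDICT (by name: the statement is the Claim_ definition above) =====
theorem sow_list_py_spec : Claim_equal_sow_list_py := by
  intro pits start_idx _ hpre
  obtain ⟨h1, h2⟩ := hpre
  have hlen : 0 < pits.length := by omega
  have hn : (0 : Int) < (pits.length : Int) := by omega
  have hidx : PySem.List.pyIdx? pits.length start_idx
      = some ((start_idx % (pits.length : Int)).toNat) := pyIdx?_emod _ _ ⟨h1, h2⟩
  set s := start_idx % (pits.length : Int) with hsdef
  have hs0 : 0 ≤ s := Int.emod_nonneg _ (by omega)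
  have hsn : s < (pits.length : Int) := Int.emod_lt_of_pos _ hn
  have hst : (s.toNat : Int) = s := Int.toNat_of_nonneg hs0
  set k := s.toNat with hkdef
  have hk : k < pits.length := by omega
  have hget : PySem.List.pyGet? pits start_idx = some pits[k] := by
    simp [PySem.List.pyGet?, hidx, List.getElem?_eq_getElem hk]
  have hset : PySem.List.pySetD pits start_idx 0 = pits.set k 0 := by
    simp [PySem.List.pySetD, PySem.List.pySet?, hidx]
  unfold Spec_sow_list_py sow_list_py sow_list_py_alt
  simp only [hget, hset, PySem.Int.mod_eq_emod_of_pos hn, PySem.Int.floordiv_eq_ediv_of_pos hn,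
    ← hsdef]
  obtain ⟨A1, A2, A3⟩ := sowLoopA_spec pits[k].toNat (pits.set k 0) start_idx (by simp [hlen])
  simp only [List.length_set] at A1 A2 A3
  have hemod : ∀ i : Nat, ((i : Int) - s - 1) % (pits.length : Int)
      = ((i : Int) - start_idx - 1) % (pits.length : Int) := by
    intro i
    rw [hsdef, show (i : Int) - start_idx % (pits.length : Int) - 1
        = ((i : Int) - 1) - start_idx % (pits.length : Int) by ring,
      emod_sub_emod_right,
      show ((i : Int) - 1) - start_idx = (i : Int) - start_idx - 1 by ring]
  have hgi : ∀ i : Nat, i < pits.length →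
      (pits.set k 0)[i]! = if (i : Int) = s then 0 else pits[i]! := by
    intro i hi
    rw [List.getElem!_eq_getElem?_getD, List.getElem?_eq_getElem (by simpa using hi),
      List.getElem_set, List.getElem!_eq_getElem?_getD, List.getElem?_eq_getElem hi]
    split_ifs with h1 h2 <;> first | rfl | (exfalso; omega)
  by_cases hpos : (0 : Int) < pits[k]
  · have hcast : ((pits[k].toNat : Nat) : Int) = pits[k] := Int.toNat_of_nonneg hpos.le
    have hm0 : pits[k].toNat ≠ 0 := by omega
    refine Prod.ext ?_ ?_ <;> dsimp only
    · rw [A1, if_neg hm0, if_pos hpos, hcast, hsdef, Int.emod_add_emod]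
    · apply List.ext_getElem?
      intro i
      by_cases hi : i < pits.length
      · rw [A3 i hi, List.getElem?_map, PySem.List.getElem?_enumerate,
          List.getElem?_eq_getElem hi, Option.map_some]
        congr 1
        simp only [zero_add, if_pos hpos]
        unfold cnt
        rw [hcast, hgi i hi, hemod i]
        have hgetbang : pits[i]! = pits[i] := by
          rw [List.getElem!_eq_getElem?_getD, List.getElem?_eq_getElem hi]; rfl
        rw [hgetbang]
        ring
      · rw [List.getElem?_eq_none (by omega),
          List.getElem?_eq_none (by simp only [List.length_map, PySem.List.length_enumerate]; omega)]
  · have hm0 : pits[k].toNat = 0 := by omega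
    rw [hm0]
    refine Prod.ext ?_ ?_ <;> dsimp only
    · rw [if_neg hpos]; rfl
    · show pits.set k 0 = _
      apply List.ext_getElem?
      intro i
      by_cases hi : i < pits.length
      · rw [List.getElem?_eq_getElem (by simpa using hi), List.getElem?_map,
          PySem.List.getElem?_enumerate, List.getElem?_eq_getElem hi, Option.map_some]
        congr 1
        simp only [zero_add, if_neg hpos]
        have hnonneg : 0 ≤ ((i : Int) - s - 1) % (pits.length : Int) :=
          Int.emod_nonneg _ (by omega)
        have hbang : (pits.set k 0)[i]'(by simpa using hi)
            = if (i : Int) = s then 0 else pits[i] := by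
          rw [List.getElem_set]
          split_ifs with ha hb <;> first | rfl | (exfalso; omega)
        rw [hbang, if_neg (not_lt.mpr hnonneg)]
        ring
      · rw [List.getElem?_eq_none (by simp only [List.length_set]; omega),
          List.getElem?_eq_none (by simp only [List.length_map, PySem.List.length_enumerate]; omega)]
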